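-- pv_equiv track=rewrite | github.com/vettel123/IS1 | Merkel.py | MerkelRoot
-- ===== SOURCE A (Python) =====
-- def MerkelRoot(hash_val):
--     counter = 0
--     merkel_root = " "
--
--     for index in range(len(hash_val)):
--         if index == 2**counter:
--             merkel_root += hash_val[index-1]
--             counter += 1
--
--         else:
--             merkel_root += hash_val[index]
--
--     return merkel_root
-- ===== SOURCE B (Python) =====
-- def MerkelRoot(hash_val):
--     s = list(hash_val)
--     p = 1
--     while p < len(hash_val):
--         s[p] = hash_val[p - 1]
--         p *= 2
--     return " " + "".join(s)
-- ===== Notes on version B (the rewrite author's own statement) =====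
-- stated objective: faster
-- what changed: A walks every index carrying a counter and testing index == 2**counter; B bulk-copies the list once and then patches only the O(log n) power-of-two indices before a single join.
import Mathlib
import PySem

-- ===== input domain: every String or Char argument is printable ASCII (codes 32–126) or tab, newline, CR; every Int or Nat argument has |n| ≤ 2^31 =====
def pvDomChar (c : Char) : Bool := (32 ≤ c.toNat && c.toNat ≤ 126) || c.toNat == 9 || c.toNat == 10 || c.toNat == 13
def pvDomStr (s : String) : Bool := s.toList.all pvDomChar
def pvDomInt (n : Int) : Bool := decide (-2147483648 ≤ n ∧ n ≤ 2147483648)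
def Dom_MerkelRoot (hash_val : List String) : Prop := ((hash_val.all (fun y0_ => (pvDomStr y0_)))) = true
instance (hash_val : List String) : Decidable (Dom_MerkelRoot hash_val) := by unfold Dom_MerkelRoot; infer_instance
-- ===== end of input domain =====

-- B replaces A's per-index counter-and-test pass by a bulk copy plus an O(log n) patch
-- of the power-of-two indices only (objective: faster by a constant-factor mechanism).

-- ===== PORT A =====
-- counter stays an Int as in Python; it is only ever 0,1,2,…, so 2**counter is
-- ported as (2 : Int) ^ counter.toNat (exact here since counter is never negative).
-- hash_val[index] and hash_val[index-1] are always in range (index-1 only reached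
-- when index = 2**counter ≥ 1), so pyGetD's default is never used.
def MerkelRoot (hash_val : List String) : String :=
  (((PySem.List.pyRange 0 (hash_val.length : Int) 1).foldl
    (fun (st : Int × String) index =>
      if index = (2 : Int) ^ st.1.toNat then
        (st.1 + 1, st.2 ++ PySem.List.pyGetD hash_val (index - 1) "")
      else
        (st.1, st.2 ++ PySem.List.pyGetD hash_val index ""))
    ((0 : Int), " "))).2

-- ===== PORT B =====
-- the while loop 'while p < len: s[p] = hash_val[p-1]; p *= 2'; p starts at 1 and
-- doubles, hence the 0 < p argument that makes the loop terminate; hash_val[p-1]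
-- is in range, so getD's default is never used.
def patchPow2 (hash_val : List String) (s : List String) (p : Nat) (hp : 0 < p) : List String :=
  if h : p < hash_val.length then
    patchPow2 hash_val (s.set p (hash_val.getD (p - 1) "")) (2 * p) (by omega)
  else s
termination_by hash_val.length - p
decreasing_by omega

def MerkelRoot_alt (hash_val : List String) : String :=
  " " ++ PySem.Str.join "" (patchPow2 hash_val hash_val 1 (by omega))

-- ===== PRECONDITION & SPEC =====
def Spec_MerkelRoot (hash_val : List String) (out : String) : Prop := out = MerkelRoot_alt hash_val
instance (hash_val : List String) (out : String) : Decidable (Spec_MerkelRoot hash_val out) := by unfold Spec_MerkelRoot; infer_instance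

-- ===== CLAIM (what is proved, stated in full; the proofs are below) =====
def Claim_equal_MerkelRoot : Prop := ∀ (hash_val : List String), Dom_MerkelRoot hash_val → Spec_MerkelRoot hash_val (MerkelRoot hash_val)

-- ===== LEMMAS AND PROOFS =====

/-- `i` is a power of two (the exponent is bounded by `i`, keeping this decidable). -/
def IsPow (i : Nat) : Prop := ∃ k < i + 1, i = 2 ^ k

theorem isPow_pow (k : Nat) : IsPow (2 ^ k) :=
  ⟨k, by have : k < 2 ^ k := Nat.lt_two_pow_self; omega, rfl⟩

theorem isPow_iff (i : Nat) : IsPow i ↔ ∃ k, i = 2 ^ k := by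
  constructor
  · rintro ⟨k, _, rfl⟩; exact ⟨k, rfl⟩
  · rintro ⟨k, rfl⟩; exact isPow_pow k

/-- the piece contributed for index `i` (proof-only; classical `if`) -/
noncomputable def gpiece (hv : List String) (i : Nat) : String :=
  @ite _ (IsPow i) (Classical.propDecidable _) (hv.getD (i - 1) "") (hv.getD i "")

/-- concatenation of the pieces for indices m, m+1, …, m+k-1 -/
noncomputable def catFrom (hv : List String) (m k : Nat) : String :=
  match k with
  | 0 => ""
  | k + 1 => gpiece hv m ++ catFrom hv (m + 1) k

theorem pow_eq_iff_isPow {m c : Nat} (h1 : m ≤ 2 ^ c) (h2 : c = 0 ∨ 2 ^ (c - 1) < m) :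
    m = 2 ^ c ↔ IsPow m := by
  constructor
  · rintro rfl; exact isPow_pow c
  · rw [isPow_iff]
    rintro ⟨k, rfl⟩
    have hk : k ≤ c := (Nat.pow_le_pow_iff_right (by omega)).mp h1
    rcases h2 with rfl | h2
    · have : k = 0 := by omega
      subst this; rfl
    · by_cases hkc : k = c
      · subst hkc; rfl
      · have h3 : (2:Nat) ^ k ≤ 2 ^ (c - 1) := Nat.pow_le_pow_right (by omega) (by omega)
        omega

theorem A_loop (hv : List String) (n : Nat) (hn : n = hv.length) :
    ∀ (k m c : Nat) (acc : String), m + k = n → m ≤ 2 ^ c → (c = 0 ∨ 2 ^ (c - 1) < m) →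
    (((PySem.List.pyRange (m : Int) (n : Int) 1).foldl
      (fun (st : Int × String) index =>
        if index = (2 : Int) ^ st.1.toNat then
          (st.1 + 1, st.2 ++ PySem.List.pyGetD hv (index - 1) "")
        else
          (st.1, st.2 ++ PySem.List.pyGetD hv index ""))
      ((c : Int), acc))).2 = acc ++ catFrom hv m k := by
  intro k
  induction k with
  | zero =>
      intro m c acc hm _ _
      rw [PySem.List.pyRange_one_eq_nil (by omega)]
      simp [catFrom]
  | succ k ih =>
      intro m c acc hm hc1 hc2
      rw [PySem.List.pyRange_one_cons (by omega)]
      simp only [List.foldl_cons]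
      have hcast : ((m : Int) = (2 : Int) ^ ((c : Int)).toNat) ↔ m = 2 ^ c := by
        rw [Int.toNat_natCast]
        constructor
        · intro h; exact_mod_cast h
        · intro h; exact_mod_cast h
      by_cases hpow : m = 2 ^ c
      · have hm1 : 1 ≤ m := by have : 0 < 2 ^ c := Nat.two_pow_pos c; omega
        rw [if_pos (hcast.mpr hpow)]
        have hidx : (m : Int) - 1 = ((m - 1 : Nat) : Int) := by omega
        have hget : PySem.List.pyGetD hv ((m : Int) - 1) "" = hv.getD (m - 1) "" := by
          rw [hidx, PySem.List.pyGetD_natCast]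
        have hc1' : (c : Int) + 1 = ((c + 1 : Nat) : Int) := by omega
        rw [hget, hc1']
        rw [show ((m : Int) + 1) = ((m + 1 : Nat) : Int) by push_cast; ring]
        rw [ih (m + 1) (c + 1) (acc ++ hv.getD (m - 1) "") (by omega)
          (by have : 0 < 2 ^ c := Nat.two_pow_pos c; rw [pow_succ]; omega)
          (by right; simpa using by omega : (c + 1 = 0 ∨ 2 ^ (c + 1 - 1) < m + 1))]
        have hg : gpiece hv m = hv.getD (m - 1) "" := by
          rw [gpiece, if_pos ((pow_eq_iff_isPow hc1 hc2).mp hpow)]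
        rw [catFrom, hg, String.append_assoc]
      · rw [if_neg (fun h => hpow (hcast.mp h))]
        have hget : PySem.List.pyGetD hv (m : Int) "" = hv.getD m "" := by
          rw [PySem.List.pyGetD_natCast]
        rw [hget]
        rw [show ((m : Int) + 1) = ((m + 1 : Nat) : Int) by push_cast; ring]
        rw [ih (m + 1) c (acc ++ hv.getD m "") (by omega) (by omega) (by omega)]
        have hg : gpiece hv m = hv.getD m "" := by
          rw [gpiece, if_neg (fun h => hpow ((pow_eq_iff_isPow hc1 hc2).mpr h))]
        rw [catFrom, hg, String.append_assoc]

theorem patchPow2_getElem? (hv : List String) :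
    ∀ fuel e (s : List String), hv.length ≤ 2 ^ e + fuel → s.length = hv.length →
    ∀ i, (patchPow2 hv s (2 ^ e) (Nat.two_pow_pos e))[i]? =
      @ite _ (IsPow i ∧ 2 ^ e ≤ i ∧ i < hv.length) (Classical.propDecidable _)
        (some (hv.getD (i - 1) "")) s[i]? := by
  intro fuel
  induction fuel with
  | zero =>
      intro e s hfuel hs i
      rw [patchPow2, dif_neg (by omega)]
      rw [if_neg (by rintro ⟨_, h2, h3⟩; omega)]
  | succ fuel ih =>
      intro e s hfuel hs i
      by_cases h : 2 ^ e < hv.length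
      · rw [patchPow2, dif_pos h]
        have h2 : patchPow2 hv (s.set (2 ^ e) (hv.getD (2 ^ e - 1) "")) (2 * 2 ^ e) (by have := Nat.two_pow_pos e; omega) =
            patchPow2 hv (s.set (2 ^ e) (hv.getD (2 ^ e - 1) "")) (2 ^ (e + 1))
              (Nat.two_pow_pos (e + 1)) := by
          congr 1
          rw [pow_succ]; omega
        rw [h2, ih (e + 1) _ (by rw [pow_succ]; have : 0 < 2 ^ e := Nat.two_pow_pos e; omega) (by simpa using hs) i]
        by_cases hi : i = 2 ^ e
        · subst hi
          rw [if_neg (by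
            rintro ⟨_, hle, _⟩
            have : (2:Nat) ^ e < 2 ^ (e + 1) := by
              have : 0 < 2 ^ e := Nat.two_pow_pos e
              rw [pow_succ]; omega
            omega)]
          rw [if_pos ⟨isPow_pow e, le_refl _, h⟩]
          rw [List.getElem?_set_self (by omega)]
        · have hcond : (IsPow i ∧ 2 ^ (e + 1) ≤ i ∧ i < hv.length) ↔
              (IsPow i ∧ 2 ^ e ≤ i ∧ i < hv.length) := by
            constructor
            · rintro ⟨hp, hle, hlt⟩
              exact ⟨hp, le_trans (Nat.pow_le_pow_right (by omega) (by omega)) hle, hlt⟩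
            · rintro ⟨hp, hle, hlt⟩
              refine ⟨hp, ?_, hlt⟩
              rcases (isPow_iff i).mp hp with ⟨k, rfl⟩
              have hek : e ≤ k := (Nat.pow_le_pow_iff_right (by omega)).mp hle
              have : e + 1 ≤ k := by
                rcases Nat.eq_or_lt_of_le hek with rfl | hlt2
                · exact absurd rfl hi
                · omega
              exact Nat.pow_le_pow_right (by omega) this
          rw [hcond]
          by_cases hc : IsPow i ∧ 2 ^ e ≤ i ∧ i < hv.length
          · rw [if_pos hc, if_pos hc]
          · rw [if_neg hc, if_neg hc, List.getElem?_set_ne (fun h => hi h.symm)]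
      · rw [patchPow2, dif_neg h]
        rw [if_neg (by rintro ⟨_, hle, hlt⟩; omega)]

/-- joining with the empty separator peels off the head -/
theorem join_empty_cons (x : String) (l : List String) :
    PySem.Str.join "" (x :: l) = x ++ PySem.Str.join "" l := by
  cases l with
  | nil =>
      apply String.ext
      rw [PySem.Str.toList_join]
      simp [PySem.Str.toList_join, PySem.Chars.join_singleton, PySem.Chars.join_nil]
  | cons y ys =>
      apply String.ext
      rw [PySem.Str.toList_join]
      simp only [List.map_cons]
      rw [PySem.Chars.join_cons_cons]
      simp [PySem.Str.toList_join]

theorem join_range_eq_catFrom (hv : List String) :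
    ∀ k m, PySem.Str.join "" ((List.range k).map (fun j => gpiece hv (m + j))) = catFrom hv m k := by
  intro k
  induction k with
  | zero =>
      intro m
      apply String.ext
      rw [catFrom]
      simp only [List.range_zero, List.map_nil]
      rw [PySem.Str.toList_join]
      simp [PySem.Chars.join_nil]
  | succ k ih =>
      intro m
      rw [List.range_succ_eq_map]
      simp only [List.map_cons, List.map_map]
      rw [join_empty_cons]
      rw [catFrom, Nat.add_zero]
      congr 1
      rw [← ih (m + 1)]
      congr 1
      apply List.map_congr_left
      intro j _
      simp only [Function.comp_apply, Nat.succ_eq_add_one]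
      congr 1
      omega

theorem isPow_pos {i : Nat} (h : IsPow i) : 1 ≤ i := by
  rcases (isPow_iff i).mp h with ⟨k, rfl⟩
  exact Nat.two_pow_pos k

theorem patch_eq_map (hv : List String) (hp : 0 < 1) :
    patchPow2 hv hv 1 hp = (List.range hv.length).map (gpiece hv) := by
  have hpx : patchPow2 hv hv 1 hp = patchPow2 hv hv (2 ^ 0) (Nat.two_pow_pos 0) := by
    congr 1
  rw [hpx]
  apply List.ext_getElem?
  intro i
  rw [patchPow2_getElem? hv hv.length 0 hv (by omega) rfl i]
  by_cases hi : i < hv.length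
  · rw [List.getElem?_map, List.getElem?_range hi]
    simp only [Option.map_some]
    unfold gpiece
    by_cases hp : IsPow i
    · rw [if_pos ⟨hp, isPow_pos hp, hi⟩, if_pos hp]
    · rw [if_neg (fun h => hp h.1), if_neg hp]
      rw [List.getElem?_eq_getElem hi, List.getD_eq_getElem?_getD, List.getElem?_eq_getElem hi]
      rfl
  · rw [if_neg (fun h => hi h.2.2)]
    rw [List.getElem?_eq_none (by omega), List.getElem?_eq_none (by simpa using by omega)]

-- ===== VERDICT (by name: the statement is the Claim_ definition above) =====
theorem MerkelRoot_spec : Claim_equal_MerkelRoot := by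
  intro hv _
  unfold Spec_MerkelRoot MerkelRoot MerkelRoot_alt
  have hA := A_loop hv hv.length rfl hv.length 0 0 " " (by omega) (by omega) (Or.inl rfl)
  simp only [Nat.cast_zero] at hA
  rw [hA, patch_eq_map]
  have hj := join_range_eq_catFrom hv hv.length 0
  congr 1
  rw [← hj]
  apply congrArg
  apply List.map_congr_left
  intro j _
  simp
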